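-- pv_equiv track=rewrite | github.com/winterdrive/myLeetHub | 1725-number-of-rectangles-that-can-form-the-largest-square/1725-number-of-rectangles-that-can-form-the-largest-square.py | countGoodRectangles
-- ===== SOURCE A (Python) =====
-- from typing import List
--
-- def countGoodRectangles(rectangles: List[List[int]]) -> int:
--     myMaxValue=0
--     myMaxKey=0
--     myDict=dict()
--     for i in rectangles:
--         if min(i) not in myDict:
--             myDict[min(i)]=1
--         else:
--             myDict[min(i)]+=1
--     for key,value in myDict.items():
--         if key>myMaxKey:
--             myMaxKey=key
--             myMaxValue=value
--     return myMaxValue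
-- ===== SOURCE B (Python) =====
-- from typing import List
--
-- def countGoodRectangles(rectangles: List[List[int]]) -> int:
--     best = 0
--     cnt = 0
--     for r in rectangles:
--         s = min(r)
--         if s > best:
--             best, cnt = s, 1
--         elif s == best and best > 0:
--             cnt += 1
--     return cnt
-- ===== Notes on version B (the rewrite author's own statement) =====
-- stated objective: alternative
-- what changed: B is a single pass with a (best, count) accumulator: the running maximum min-side and how many times it has occurred, reset to 1 when a larger side appears; A instead builds a frequency dict in one pass and then scans its distinct keys for the largest.
import Mathlib
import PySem

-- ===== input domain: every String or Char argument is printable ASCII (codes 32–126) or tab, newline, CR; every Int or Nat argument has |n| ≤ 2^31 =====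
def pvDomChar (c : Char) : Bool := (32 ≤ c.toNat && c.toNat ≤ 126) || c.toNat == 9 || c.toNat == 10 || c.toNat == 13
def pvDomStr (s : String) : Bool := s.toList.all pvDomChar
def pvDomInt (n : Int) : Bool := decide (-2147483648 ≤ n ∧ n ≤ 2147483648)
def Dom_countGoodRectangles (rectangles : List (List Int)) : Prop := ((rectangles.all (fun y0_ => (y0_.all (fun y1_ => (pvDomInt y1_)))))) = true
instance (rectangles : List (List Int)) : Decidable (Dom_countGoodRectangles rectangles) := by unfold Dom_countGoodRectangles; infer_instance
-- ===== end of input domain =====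

-- B replaces A's two-stage frequency-dict + max-key scan by a single pass carrying a
-- (best side, count) accumulator that resets the count whenever a larger min side appears.


-- ===== PORT A =====
-- one iteration of A's dict-building loop; min([]) raises in Python, so the `.getD 0` is unreachable under Pre_
def aStep (d : PySem.Dict Int Int) (i : List Int) : PySem.Dict Int Int :=
  let m := (PySem.List.min? i (fun x => x)).getD 0
  if d.contains m then d.modify m 0 (· + 1) else d.insert m 1

-- A's second loop over myDict.items(), carrying myMaxKey and myMaxValue
def aScan : List (Int × Int) → Int → Int → Int
  | [], _, mv => mv
  | (k, v) :: rest, mk, mv => if k > mk then aScan rest k v else aScan rest mk mv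

def countGoodRectangles (rectangles : List (List Int)) : Int :=
  aScan (rectangles.foldl aStep PySem.Dict.empty).items 0 0

-- ===== PORT B =====
-- one iteration of B's loop: s = min(r); update the (best, cnt) pair
def bStep (st : Int × Int) (r : List Int) : Int × Int :=
  let s := (PySem.List.min? r (fun x => x)).getD 0
  if s > st.1 then (s, 1)
  else if s = st.1 ∧ st.1 > 0 then (st.1, st.2 + 1)
  else st

def countGoodRectangles_alt (rectangles : List (List Int)) : Int :=
  (rectangles.foldl bStep (0, 0)).2

-- ===== PRECONDITION & SPEC =====
-- Pre_ excludes inputs containing a rectangle with no sides, on which Python's min of a zero-length list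
-- raises ValueError in both A and B.
def Pre_countGoodRectangles (rectangles : List (List Int)) : Prop :=
  ∀ r ∈ rectangles, r ≠ []
instance (rectangles : List (List Int)) : Decidable (Pre_countGoodRectangles rectangles) := by
  unfold Pre_countGoodRectangles; infer_instance
def pvWitness_countGoodRectangles : List (List Int) := [[1, 2], [3, 3]]

def Spec_countGoodRectangles (rectangles : List (List Int)) (out : Int) : Prop :=
  out = countGoodRectangles_alt rectangles
instance (rectangles : List (List Int)) (out : Int) : Decidable (Spec_countGoodRectangles rectangles out) := by
  unfold Spec_countGoodRectangles; infer_instance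

-- ===== CLAIM (what is proved, stated in full; the proofs are below) =====
def Claim_equal_countGoodRectangles : Prop := ∀ (rectangles : List (List Int)), Dom_countGoodRectangles rectangles → Pre_countGoodRectangles rectangles → Spec_countGoodRectangles rectangles (countGoodRectangles rectangles)

-- ===== LEMMAS AND PROOFS =====

-- A's branchy dict update is exactly the Counter update step
lemma aStep_eq_modify (d : PySem.Dict Int Int) (i : List Int) :
    aStep d i = d.modify ((PySem.List.min? i (fun x => x)).getD 0) 0 (· + 1) := by
  unfold aStep
  by_cases h : d.contains ((PySem.List.min? i (fun x => x)).getD 0) = true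
  · simp [h]
  · simp only [Bool.not_eq_true] at h
    simp [h, PySem.Dict.modify, PySem.Dict.getD_of_not_contains _ _ h]

-- A's dict is Counter(sides)
lemma aFold_eq_counter (rectangles : List (List Int)) :
    rectangles.foldl aStep PySem.Dict.empty
      = PySem.Dict.counter (rectangles.map (fun r => (PySem.List.min? r (fun x => x)).getD 0)) := by
  rw [PySem.Dict.counter_eq_foldl, List.foldl_map]
  exact List.foldl_ext _ _ _ (fun d i _ => aStep_eq_modify d i)

lemma foldl_max_le (t : List Int) : ∀ (a b : Int), a ≤ b → (∀ y ∈ t, y ≤ b) → t.foldl max a ≤ b := by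
  induction t with
  | nil => intro a b h _; simpa using h
  | cons x xs ih =>
    intro a b h h2
    simp only [List.foldl_cons]
    exact ih _ _ (max_le h (h2 x (by simp))) (fun y hy => h2 y (List.mem_cons_of_mem _ hy))

-- A's items scan on a key-indexed map returns the value at the running maximum key (or mv if nothing beats mk)
lemma aScan_map (u : List Int) (c : Int → Int) : ∀ (mk mv : Int),
    aScan (u.map (fun k => (k, c k))) mk mv
      = (if u.foldl max mk = mk then mv else c (u.foldl max mk)) := by
  induction u with
  | nil => intro mk mv; simp [aScan]
  | cons k rest ih =>
    intro mk mv
    simp only [List.map_cons, aScan, List.foldl_cons]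
    by_cases h : mk < k
    · have hmax : max mk k = k := max_eq_right h.le
      have hk : k ≤ rest.foldl max k := (PySem.List.le_foldl_max rest k).1
      rw [if_pos h, ih k (c k), hmax]
      have hne : rest.foldl max k ≠ mk := by omega
      rw [if_neg hne]
      split_ifs with h2
      · rw [h2]
      · rfl
    · have hmax : max mk k = mk := max_eq_left (by omega)
      rw [if_neg (by omega), ih mk mv, hmax]

-- A as a direct function of the list of min sides
lemma A_char (rectangles : List (List Int)) :
    countGoodRectangles rectangles
      = (let sides := rectangles.map (fun r => (PySem.List.min? r (fun x => x)).getD 0)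
         let m0 := (PySem.Set.ofList sides).foldl max 0
         if m0 = 0 then 0 else (sides.count m0 : Int)) := by
  unfold countGoodRectangles
  rw [aFold_eq_counter, PySem.Dict.items_counter, aScan_map]

-- folding max 0 over a list and over its distinct elements agree
lemma foldl_max_ofList (sides : List Int) :
    (PySem.Set.ofList sides).foldl max 0 = sides.foldl max 0 := by
  have h1 : (PySem.Set.ofList sides).foldl max 0 ≤ sides.foldl max 0 :=
    foldl_max_le _ 0 _ (PySem.List.le_foldl_max sides 0).1
      (fun y hy => (PySem.List.le_foldl_max sides 0).2 y ((PySem.Set.mem_ofList sides y).mp hy))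
  have h2 : sides.foldl max 0 ≤ (PySem.Set.ofList sides).foldl max 0 :=
    foldl_max_le _ 0 _ (PySem.List.le_foldl_max _ 0).1
      (fun y hy => (PySem.List.le_foldl_max _ 0).2 y ((PySem.Set.mem_ofList sides y).mpr hy))
  omega

-- B's fold over the min sides: best is the running max (seeded 0), cnt counts its occurrences (0 when best = 0)
lemma bFold_char (sides : List Int) :
    sides.foldl (fun st s =>
        if s > st.1 then (s, 1)
        else if s = st.1 ∧ st.1 > 0 then (st.1, st.2 + 1)
        else st) ((0 : Int), (0 : Int))
      = (sides.foldl max 0,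
         if sides.foldl max 0 > 0 then (sides.count (sides.foldl max 0) : Int) else 0) := by
  induction sides using List.reverseRecOn with
  | nil => simp
  | append_singleton l s ih =>
    have hb0 : (0:Int) ≤ l.foldl max 0 := (PySem.List.le_foldl_max l 0).1
    rw [List.foldl_append, List.foldl_append, ih]
    simp only [List.foldl_cons, List.foldl_nil, List.count_append, List.count_cons,
      List.count_nil]
    by_cases h1 : s > l.foldl max 0
    · have hmax : max (l.foldl max 0) s = s := max_eq_right h1.le
      have hnot : s ∉ l := fun hm => absurd ((PySem.List.le_foldl_max l 0).2 s hm) (by omega)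
      have hcnt : l.count s = 0 := List.count_eq_zero.mpr hnot
      simp only [if_pos h1, hmax, hcnt]
      rw [if_pos (by omega : s > (0:Int))]
      simp
    · have hmax : max (l.foldl max 0) s = l.foldl max 0 := max_eq_left (by omega)
      rw [if_neg h1, hmax]
      by_cases h2 : s = l.foldl max 0 ∧ l.foldl max 0 > 0
      · rw [if_pos h2, if_pos h2.2, if_pos h2.2]
        simp [h2.1]
      · rw [if_neg h2]
        by_cases h3 : l.foldl max 0 > 0
        · have hne : ¬ (s == l.foldl max 0) = true := by
            simp only [beq_iff_eq]
            intro hc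
            exact h2 ⟨hc, h3⟩
          rw [if_pos h3, if_pos h3, if_neg hne]
          simp
        · rw [if_neg h3, if_neg h3]

-- ===== VERDICT (by name: the statement is the Claim_ definition above) =====
theorem countGoodRectangles_spec : Claim_equal_countGoodRectangles := by
  intro rectangles _ _
  show countGoodRectangles rectangles = countGoodRectangles_alt rectangles
  rw [A_char]
  have hB : countGoodRectangles_alt rectangles
      = ((rectangles.map (fun r => (PySem.List.min? r (fun x => x)).getD 0)).foldl
          (fun st s =>
            if s > st.1 then (s, 1)
            else if s = st.1 ∧ st.1 > 0 then (st.1, st.2 + 1)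
            else st) ((0 : Int), (0 : Int))).2 := by
    unfold countGoodRectangles_alt
    rw [List.foldl_map]
    rfl
  rw [hB, bFold_char]
  simp only [foldl_max_ofList]
  set sides := rectangles.map (fun r => (PySem.List.min? r (fun x => x)).getD 0) with hs
  have h0 : (0:Int) ≤ sides.foldl max 0 := (PySem.List.le_foldl_max sides 0).1
  by_cases h : sides.foldl max 0 = 0
  · rw [if_pos h, if_neg (by omega)]
  · rw [if_neg h, if_pos (by omega)]
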